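-- pv_equiv track=rewrite | github.com/sueszli/vector-database-benchmark | dataset/python-mutated/dump_github_issues.py | join_list_data
-- ===== SOURCE A (Python) =====
-- def join_list_data(lists):
--     if False:
--         return 10
--     result = []
--     for data in lists:
--         if not data:
--             break
--         result.extend(data)
--     return result
-- ===== SOURCE B (Python) =====
-- def join_list_data(lists):
--     try:
--         k = lists.index([])
--     except ValueError:
--         k = len(lists)
--     return [x for sub in lists[:k] for x in sub]
-- ===== Notes on version B (the rewrite author's own statement) =====
-- stated objective: alternative
-- what changed: Two staged passes replace A's single accumulator loop with break: first list.index locates the position of the first empty sublist (falling back to the full length when none exists), then a comprehension flattens the slice up to that cut point; no running result is extended and no break exists.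
import Mathlib
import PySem

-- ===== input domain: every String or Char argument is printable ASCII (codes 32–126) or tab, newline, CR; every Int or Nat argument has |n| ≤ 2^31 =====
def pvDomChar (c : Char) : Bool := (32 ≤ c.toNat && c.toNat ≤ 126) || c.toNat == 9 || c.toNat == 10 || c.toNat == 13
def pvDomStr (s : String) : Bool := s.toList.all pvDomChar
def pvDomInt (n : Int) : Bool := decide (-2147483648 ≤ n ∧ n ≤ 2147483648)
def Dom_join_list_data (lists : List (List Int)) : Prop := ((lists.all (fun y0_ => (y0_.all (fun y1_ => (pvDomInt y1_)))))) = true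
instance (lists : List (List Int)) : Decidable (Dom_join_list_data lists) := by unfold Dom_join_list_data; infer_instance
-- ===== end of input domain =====

-- ===== PORT A =====
-- B: two staged passes — list.index([]) finds the cut point, then lists[:k] is flattened by a comprehension (alternative decomposition; no accumulator, no break).
-- A's loop with early break: structural recursion carrying the result accumulator
def joinLoopA : List (List Int) → List Int → List Int
  | [], result => result
  | data :: rest, result =>
    if data = [] then result else joinLoopA rest (result ++ data)

def join_list_data (lists : List (List Int)) : List Int :=
  joinLoopA lists []

-- ===== PORT B =====
def join_list_data_alt (lists : List (List Int)) : List Int :=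
  let k : Nat :=
    match PySem.List.index? lists ([] : List Int) with
    | some i => i
    | none => lists.length
  (PySem.List.slice lists none (some (k : Int))).flatMap (fun sub => sub.map (fun x => x))

-- ===== PRECONDITION & SPEC =====
def Spec_join_list_data (lists : List (List Int)) (out : List Int) : Prop := out = join_list_data_alt lists
instance (lists : List (List Int)) (out : List Int) : Decidable (Spec_join_list_data lists out) := by unfold Spec_join_list_data; infer_instance

-- ===== CLAIM =====
def Claim_equal_join_list_data : Prop := ∀ (lists : List (List Int)), Dom_join_list_data lists → Spec_join_list_data lists (join_list_data lists)

-- ===== LEMMAS AND PROOFS =====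
theorem alt_cons_empty (rest : List (List Int)) :
    join_list_data_alt ([] :: rest) = [] := by
  simp [join_list_data_alt, PySem.List.slice_to]

theorem alt_cons (d : List Int) (rest : List (List Int)) (h : d ≠ []) :
    join_list_data_alt (d :: rest) = d ++ join_list_data_alt rest := by
  simp only [join_list_data_alt]
  rw [PySem.List.index?_cons_of_ne rest h]
  cases hk : PySem.List.index? rest ([] : List Int) with
  | none =>
    simp only [Option.map_none]
    rw [PySem.List.slice_to_natCast, PySem.List.slice_to_natCast]
    simp
  | some i =>
    simp only [Option.map_some]
    rw [PySem.List.slice_to_natCast, PySem.List.slice_to_natCast, List.take_succ_cons]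
    simp

theorem joinLoopA_eq (lists : List (List Int)) (acc : List Int) :
    joinLoopA lists acc = acc ++ join_list_data_alt lists := by
  induction lists generalizing acc with
  | nil => simp [joinLoopA, join_list_data_alt, PySem.List.slice_to]
  | cons d rest ih =>
    by_cases h : d = []
    · subst h
      simp [joinLoopA, alt_cons_empty]
    · rw [joinLoopA, if_neg h, ih, alt_cons d rest h, List.append_assoc]

-- ===== VERDICT =====
theorem join_list_data_spec : Claim_equal_join_list_data := by
  intro lists _
  unfold Spec_join_list_data join_list_data
  simpa using joinLoopA_eq lists []
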